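-- pv_equiv track=rewrite | github.com/RomarioDeveloper/Ton_codeforce | 2.py | solve
-- ===== SOURCE A (Python) =====
-- def solve(t, test_cases):
--     results = []
--     for s in test_cases:
--         n = len(s)
--         for i in range(n - 1):
--             if s[i] != s[i + 1]:
--                 results.append(s[i:i + 2])
--                 break
--         else:
--             results.append("-1" if n == 1 else s)
--     return results
-- ===== SOURCE B (Python) =====
-- def solve(t, test_cases):
--     out = []
--     for s in test_cases:
--         # stage 1: run-length compress the whole string to its run characters
--         runs = []
--         for ch in s:
--             if not runs or runs[-1] != ch:
--                 runs.append(ch)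
--         # stage 2: the first adjacent differing pair is the first run boundary
--         if len(runs) >= 2:
--             out.append(runs[0] + runs[1])
--         else:
--             out.append('-1' if len(s) == 1 else s)
--     return out
-- ===== Notes on version B (the rewrite author's own statement) =====
-- stated objective: alternative
-- what changed: Instead of scanning adjacent index pairs with an early break, B run-length-compresses each whole string into its sequence of run characters and then reads the answer off the first run boundary (runs[0]+runs[1]), falling back to -1/s when there is at most one run.
import Mathlib
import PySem

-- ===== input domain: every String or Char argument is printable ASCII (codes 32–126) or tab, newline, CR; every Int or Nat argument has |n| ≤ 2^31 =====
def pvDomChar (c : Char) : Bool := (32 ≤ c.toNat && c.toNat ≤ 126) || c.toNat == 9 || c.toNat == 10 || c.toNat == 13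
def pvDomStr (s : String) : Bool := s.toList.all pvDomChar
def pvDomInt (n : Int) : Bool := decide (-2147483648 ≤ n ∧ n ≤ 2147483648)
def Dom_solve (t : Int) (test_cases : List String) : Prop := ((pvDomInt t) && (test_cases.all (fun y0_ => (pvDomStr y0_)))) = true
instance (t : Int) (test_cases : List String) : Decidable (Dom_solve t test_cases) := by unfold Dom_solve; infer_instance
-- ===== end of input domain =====

-- B replaces A's early-breaking adjacent-pair scan by run-length-compressing each whole string
-- into its run characters and reading the answer off the first run boundary; objective: alternative.

-- ===== PORT A =====
-- the 'for i in range(n-1): if s[i] != s[i+1]: … break' loop, as structural recursion on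
-- the character list (compares each adjacent pair in order, stops at the first difference)
def scanA : List Char → Option String
  | [] => none
  | [_] => none
  | a :: b :: rest => if a ≠ b then some (String.mk [a, b]) else scanA (b :: rest)

def solve (t : Int) (test_cases : List String) : List String :=
  test_cases.foldl (fun results s =>
    match scanA s.toList with
    | some p => results ++ [p]                                   -- results.append(s[i:i+2]); break
    | none => results ++ [if s.toList.length = 1 then "-1" else s])  -- for-else branch
    []

-- ===== PORT B =====
def solve_alt (t : Int) (test_cases : List String) : List String :=
  test_cases.foldl (fun out s =>
    -- stage 1: runs = []; for ch in s: if not runs or runs[-1] != ch: runs.append(ch)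
    let runs := s.toList.foldl (fun runs ch =>
      if runs = [] ∨ runs.getLast? ≠ some ch then runs ++ [ch] else runs) []
    -- stage 2: read off the first run boundary
    out ++ [match runs with
      | r0 :: r1 :: _ => String.mk [r0, r1]                      -- runs[0] + runs[1]
      | _ => if s.toList.length = 1 then "-1" else s])
    []

-- ===== PRECONDITION & SPEC =====
def Spec_solve (t : Int) (test_cases : List String) (out : List String) : Prop := out = solve_alt t test_cases
instance (t : Int) (test_cases : List String) (out : List String) : Decidable (Spec_solve t test_cases out) := by unfold Spec_solve; infer_instance

-- ===== CLAIM (what is proved, stated in full; the proofs are below) =====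
def Claim_equal_solve : Prop := ∀ (t : Int) (test_cases : List String), Dom_solve t test_cases → Spec_solve t test_cases (solve t test_cases)

-- ===== LEMMAS AND PROOFS =====

-- A's scan starting at a head c finds exactly the boundary of the leading run of c
theorem scanA_eq_dropWhile (cs : List Char) : ∀ (c : Char),
    scanA (c :: cs) = (match cs.dropWhile (· = c) with
      | [] => none
      | d :: _ => some (String.mk [c, d])) := by
  induction cs with
  | nil => intro c; simp [scanA]
  | cons b rest ih =>
    intro c
    by_cases h : c = b
    · subst h
      simp [scanA, List.dropWhile, ih c]
    · simp [scanA, List.dropWhile, h, Ne.symm h]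

-- proof-only: the run characters of cs after a pending last run character l
def runsFrom (l : Char) : List Char → List Char
  | [] => []
  | c :: cs => if c = l then runsFrom l cs else c :: runsFrom c cs

def stepB (runs : List Char) (ch : Char) : List Char :=
  if runs = [] ∨ runs.getLast? ≠ some ch then runs ++ [ch] else runs

theorem foldl_stepB (cs : List Char) : ∀ (r : List Char) (l : Char),
    cs.foldl stepB (r ++ [l]) = r ++ [l] ++ runsFrom l cs := by
  induction cs with
  | nil => intro r l; simp [runsFrom]
  | cons c cs ih =>
    intro r l
    by_cases h : c = l
    · subst h
      have hs : stepB (r ++ [c]) c = r ++ [c] := by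
        simp [stepB]
      simp [List.foldl_cons, hs, ih r c, runsFrom]
    · have hs : stepB (r ++ [l]) c = (r ++ [l]) ++ [c] := by
        simp [stepB, Ne.symm h]
      simp only [List.foldl_cons, hs]
      rw [ih (r ++ [l]) c]
      simp [runsFrom, h]

-- runsFrom starts with the first character differing from l
theorem runsFrom_eq (cs : List Char) : ∀ (l : Char),
    runsFrom l cs = (match cs.dropWhile (· = l) with
      | [] => []
      | d :: rest => d :: runsFrom d rest) := by
  induction cs with
  | nil => intro l; simp [runsFrom]
  | cons c cs ih =>
    intro l
    by_cases h : c = l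
    · subst h
      simp [runsFrom, List.dropWhile, ih c]
    · simp [runsFrom, List.dropWhile, h]

-- per-string bodies of the two ports
def fA (s : String) : String :=
  match scanA s.toList with
  | some p => p
  | none => if s.toList.length = 1 then "-1" else s

def fB (s : String) : String :=
  match s.toList.foldl stepB [] with
  | r0 :: r1 :: _ => String.mk [r0, r1]
  | _ => if s.toList.length = 1 then "-1" else s

theorem fA_eq_fB (s : String) : fA s = fB s := by
  unfold fA fB
  cases h : s.toList with
  | nil => simp [scanA, stepB]
  | cons c tl =>
    have h0 : stepB [] c = [c] := by simp [stepB]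
    have h1 : tl.foldl stepB [c] = [c] ++ runsFrom c tl := foldl_stepB tl [] c
    rw [scanA_eq_dropWhile tl c]
    simp only [List.foldl_cons, h0, h1, runsFrom_eq tl c]
    cases hd : tl.dropWhile (· = c) with
    | nil => simp
    | cons d rest => simp

theorem solveA_foldl (l : List String) : ∀ acc : List String,
    l.foldl (fun results s =>
      match scanA s.toList with
      | some p => results ++ [p]
      | none => results ++ [if s.toList.length = 1 then "-1" else s]) acc
    = acc ++ l.map fA := by
  induction l with
  | nil => intro acc; simp
  | cons x xs ih =>
    intro acc
    have hb : (match scanA x.toList with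
        | some p => acc ++ [p]
        | none => acc ++ [if x.toList.length = 1 then "-1" else x]) = acc ++ [fA x] := by
      unfold fA; cases scanA x.toList <;> rfl
    simp only [List.foldl_cons, hb, ih]
    simp

theorem solveB_foldl (l : List String) : ∀ acc : List String,
    l.foldl (fun out s =>
      let runs := s.toList.foldl (fun runs ch =>
        if runs = [] ∨ runs.getLast? ≠ some ch then runs ++ [ch] else runs) []
      out ++ [match runs with
        | r0 :: r1 :: _ => String.mk [r0, r1]
        | _ => if s.toList.length = 1 then "-1" else s]) acc
    = acc ++ l.map fB := by
  induction l with
  | nil => intro acc; simp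
  | cons x xs ih =>
    intro acc
    simp only [List.foldl_cons, ih]
    unfold fB stepB
    simp

-- ===== VERDICT (by name: the statement is the Claim_ definition above) =====
theorem solve_spec : Claim_equal_solve := by
  intro t test_cases _
  unfold Spec_solve solve solve_alt
  rw [solveA_foldl, solveB_foldl]
  simp [fA_eq_fB]
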